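-- pv_equiv track=rewrite | github.com/MartinThoma/algorithms | finite-groups/finiteGroupChecks.py | check_inverse
-- ===== SOURCE A (Python) =====
-- def check_inverse(conjunction, nr_of_elements, neutral_element):
--     """
--     Check if every element of the conjunction has an inverse element.
--
--     Parameters
--     ----------
--     conjunction
--     nr_of_elements : int
--     neutral_element
--
--     Returns
--     -------
--     tuple
--         (bool, el) - if it is False, give a counter example. Otherwise
--         (True, -1)
--     """
--     for el in range(nr_of_elements):
--         has_inverse = False
--         for possibleInverse in range(nr_of_elements):
--             if conjunction[el][possibleInverse] == neutral_element and \
--                conjunction[possibleInverse][el] == neutral_element: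
--                 has_inverse = True
--                 break
--         if not has_inverse:
--             return False, el
--     return True, -1
-- ===== SOURCE B (Python) =====
-- def check_inverse(conjunction, nr_of_elements, neutral_element):
--     # Symmetry-based marking: the "mutual inverse" relation is symmetric, so
--     # one pass over just the UPPER TRIANGLE of the table marks, for every
--     # mutually-neutral pair (i, j), both endpoints as invertible; a second
--     # pass (no inner loop at all) reports the first unmarked element.
--     invertible = set()
--     for i in range(nr_of_elements):
--         for j in range(i, nr_of_elements):
--             if conjunction[i][j] == neutral_element and \
--                conjunction[j][i] == neutral_element:
--                 invertible.add(i)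
--                 invertible.add(j)
--     for el in range(nr_of_elements):
--         if el not in invertible:
--             return False, el
--     return True, -1
-- ===== Notes on version B (the rewrite author's own statement) =====
-- stated objective: alternative
-- what changed: B exploits the symmetry of the mutual-inverse relation: one pass over only the upper triangle of the table marks both endpoints of every mutually-neutral pair in a set, then a second pass with no inner loop reports the first unmarked element.
-- outside the precondition, e.g. on check_inverse([[0, 1, 0], [5, 5, 5], []], 3, 0): A returns (False, 1), B raises IndexError
import Mathlib
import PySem

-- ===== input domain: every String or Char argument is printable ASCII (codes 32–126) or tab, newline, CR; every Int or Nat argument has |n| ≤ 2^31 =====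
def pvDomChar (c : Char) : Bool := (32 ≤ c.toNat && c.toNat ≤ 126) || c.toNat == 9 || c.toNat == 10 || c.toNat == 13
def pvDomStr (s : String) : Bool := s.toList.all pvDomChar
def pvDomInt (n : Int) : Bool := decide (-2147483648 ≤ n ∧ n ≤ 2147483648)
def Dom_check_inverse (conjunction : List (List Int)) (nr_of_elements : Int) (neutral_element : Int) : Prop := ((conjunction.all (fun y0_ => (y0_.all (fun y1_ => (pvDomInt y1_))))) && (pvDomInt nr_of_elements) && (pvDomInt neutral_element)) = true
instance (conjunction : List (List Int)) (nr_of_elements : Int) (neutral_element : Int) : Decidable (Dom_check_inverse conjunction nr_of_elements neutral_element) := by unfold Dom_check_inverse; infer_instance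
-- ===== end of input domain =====

-- B exploits symmetry of the mutual-inverse relation: one pass over the upper triangle of the
-- table marks both endpoints of each mutually-neutral pair; a second pass with no inner loop
-- reports the first unmarked element (alternative decomposition, same cost class).

-- ===== PORT A =====
-- conjunction[i][j] as a total read; exact whenever Python's reads are in range,
-- which Pre_ guarantees for every read either program performs
def pvGet2 (conj : List (List Int)) (i j : Int) : Int :=
  PySem.List.pyGetD (PySem.List.pyGetD conj i []) j 0

def pvAInner (conj : List (List Int)) (e el : Int) : List Int → Bool
  | [] => false
  | j :: js =>
      if pvGet2 conj el j = e ∧ pvGet2 conj j el = e then true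
      else pvAInner conj e el js

def pvAOuter (conj : List (List Int)) (n e : Int) : List Int → Bool × Int
  | [] => (true, -1)
  | el :: els =>
      if pvAInner conj e el (PySem.List.pyRange 0 n 1) then pvAOuter conj n e els
      else (false, el)

def check_inverse (conjunction : List (List Int)) (nr_of_elements : Int) (neutral_element : Int) : Bool × Int :=
  pvAOuter conjunction nr_of_elements neutral_element (PySem.List.pyRange 0 nr_of_elements 1)

-- ===== PORT B =====
-- B's own total read of conjunction[i][j] (exact in range, which Pre_ guarantees)
def pvCell (conj : List (List Int)) (i j : Int) : Int :=
  PySem.List.pyGetD (PySem.List.pyGetD conj i []) j 0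

-- the upper-triangle marking pass: for each i, for each j in range(i, n), mark both i and j
def pvMark (conj : List (List Int)) (n e : Int) : PySem.Set Int :=
  (PySem.List.pyRange 0 n 1).foldl (fun s i =>
    (PySem.List.pyRange i n 1).foldl (fun s2 j =>
      if pvCell conj i j = e ∧ pvCell conj j i = e then
        PySem.Set.add (PySem.Set.add s2 i) j
      else s2) s) PySem.Set.empty

def pvBFind (inv : PySem.Set Int) : List Int → Bool × Int
  | [] => (true, -1)
  | el :: els =>
      if PySem.Set.contains inv el then pvBFind inv els else (false, el)

def check_inverse_alt (conjunction : List (List Int)) (nr_of_elements : Int) (neutral_element : Int) : Bool × Int :=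
  pvBFind (pvMark conjunction nr_of_elements neutral_element)
    (PySem.List.pyRange 0 nr_of_elements 1)

-- ===== PRECONDITION & SPEC =====
-- Pre_ restricts to full n×n tables — the natural Cayley-table domain; on ragged tables A can
-- return an early counterexample as an accident of its scan order while B's whole-triangle
-- pass raises IndexError, so those inputs are excluded.
def Pre_check_inverse (conjunction : List (List Int)) (nr_of_elements : Int) (neutral_element : Int) : Prop :=
  nr_of_elements ≤ (conjunction.length : Int) ∧
  ∀ k < nr_of_elements.toNat, nr_of_elements ≤ ((conjunction.getD k []).length : Int)

instance (conjunction : List (List Int)) (nr_of_elements : Int) (neutral_element : Int) : Decidable (Pre_check_inverse conjunction nr_of_elements neutral_element) := by unfold Pre_check_inverse; infer_instance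

def pvWitness_check_inverse : List (List Int) × Int × Int := ([[0, 1], [1, 0]], 2, 0)

def Spec_check_inverse (conjunction : List (List Int)) (nr_of_elements : Int) (neutral_element : Int) (out : Bool × Int) : Prop := out = check_inverse_alt conjunction nr_of_elements neutral_element
instance (conjunction : List (List Int)) (nr_of_elements : Int) (neutral_element : Int) (out : Bool × Int) : Decidable (Spec_check_inverse conjunction nr_of_elements neutral_element out) := by unfold Spec_check_inverse; infer_instance

-- ===== CLAIM =====
def Claim_equal_check_inverse : Prop := ∀ (conjunction : List (List Int)) (nr_of_elements : Int) (neutral_element : Int), Dom_check_inverse conjunction nr_of_elements neutral_element → Pre_check_inverse conjunction nr_of_elements neutral_element → Spec_check_inverse conjunction nr_of_elements neutral_element (check_inverse conjunction nr_of_elements neutral_element)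

-- ===== LEMMAS AND PROOFS =====

theorem pv_mem_inner_fold (conj : List (List Int)) (e i : Int) (l : List Int)
    (s : PySem.Set Int) (x : Int) :
    x ∈ l.foldl (fun s2 j =>
        if pvCell conj i j = e ∧ pvCell conj j i = e then
          PySem.Set.add (PySem.Set.add s2 i) j else s2) s ↔
      x ∈ s ∨ ∃ j ∈ l, (pvCell conj i j = e ∧ pvCell conj j i = e) ∧ (x = i ∨ x = j) := by
  induction l generalizing s with
  | nil => simp
  | cons j l ih =>
    simp only [List.foldl_cons, ih, List.mem_cons]
    split_ifs with hj
    · simp only [PySem.Set.mem_add]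
      constructor
      · rintro (((h | h) | h) | ⟨r, hr, h1, h2⟩)
        · exact Or.inl h
        · exact Or.inr ⟨j, Or.inl rfl, hj, Or.inl h⟩
        · exact Or.inr ⟨j, Or.inl rfl, hj, Or.inr h⟩
        · exact Or.inr ⟨r, Or.inr hr, h1, h2⟩
      · rintro (h | ⟨r, (rfl | hr), h1, (h2 | h2)⟩)
        · exact Or.inl (Or.inl (Or.inl h))
        · exact Or.inl (Or.inl (Or.inr h2))
        · exact Or.inl (Or.inr h2)
        · exact Or.inl (Or.inl (Or.inr h2))
        · exact Or.inr ⟨r, hr, h1, Or.inr h2⟩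
    · constructor
      · rintro (h | ⟨r, hr, h1, h2⟩)
        · exact Or.inl h
        · exact Or.inr ⟨r, Or.inr hr, h1, h2⟩
      · rintro (h | ⟨r, (rfl | hr), h1, h2⟩)
        · exact Or.inl h
        · exact absurd h1 hj
        · exact Or.inr ⟨r, hr, h1, h2⟩

theorem pv_mem_outer_fold (conj : List (List Int)) (n e : Int) (l : List Int)
    (s : PySem.Set Int) (x : Int) :
    x ∈ l.foldl (fun s i =>
        (PySem.List.pyRange i n 1).foldl (fun s2 j =>
          if pvCell conj i j = e ∧ pvCell conj j i = e then
            PySem.Set.add (PySem.Set.add s2 i) j else s2) s) s ↔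
      x ∈ s ∨ ∃ i ∈ l, ∃ j ∈ PySem.List.pyRange i n 1,
        (pvCell conj i j = e ∧ pvCell conj j i = e) ∧ (x = i ∨ x = j) := by
  induction l generalizing s with
  | nil => simp
  | cons i l ih =>
    simp only [List.foldl_cons, ih, pv_mem_inner_fold, List.mem_cons]
    constructor
    · rintro ((h | ⟨j, hj, h1, h2⟩) | ⟨r, hr, h⟩)
      · exact Or.inl h
      · exact Or.inr ⟨i, Or.inl rfl, j, hj, h1, h2⟩
      · exact Or.inr ⟨r, Or.inr hr, h⟩
    · rintro (h | ⟨r, (rfl | hr), j, hj, h1, h2⟩)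
      · exact Or.inl (Or.inl h)
      · exact Or.inl (Or.inr ⟨j, hj, h1, h2⟩)
      · exact Or.inr ⟨r, hr, j, hj, h1, h2⟩

-- marked m ⟺ m has some mutually-neutral partner j in [0, n)
theorem pv_mem_mark_iff (conj : List (List Int)) (n e m : Int) (hm : 0 ≤ m ∧ m < n) :
    m ∈ pvMark conj n e ↔
      ∃ j, 0 ≤ j ∧ j < n ∧ pvCell conj m j = e ∧ pvCell conj j m = e := by
  unfold pvMark
  rw [pv_mem_outer_fold]
  simp only [PySem.Set.empty, List.not_mem_nil, false_or, PySem.List.mem_pyRange_one]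
  constructor
  · rintro ⟨i, ⟨hi0, hin⟩, j, ⟨hij, hjn⟩, ⟨h1, h2⟩, (rfl | rfl)⟩
    · exact ⟨j, by omega, hjn, h1, h2⟩
    · exact ⟨i, hi0, hin, h2, h1⟩
  · rintro ⟨j, hj0, hjn, h1, h2⟩
    by_cases h : m ≤ j
    · exact ⟨m, ⟨hm.1, hm.2⟩, j, ⟨h, hjn⟩, ⟨h1, h2⟩, Or.inl rfl⟩
    · exact ⟨j, ⟨hj0, hjn⟩, m, ⟨by omega, hm.2⟩, ⟨h2, h1⟩, Or.inr rfl⟩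

theorem pvAInner_iff (conj : List (List Int)) (e m n : Int) :
    pvAInner conj e m (PySem.List.pyRange 0 n 1) = true ↔
      ∃ j, 0 ≤ j ∧ j < n ∧ pvGet2 conj m j = e ∧ pvGet2 conj j m = e := by
  have key : ∀ l : List Int, pvAInner conj e m l = true ↔
      ∃ j ∈ l, pvGet2 conj m j = e ∧ pvGet2 conj j m = e := by
    intro l
    induction l with
    | nil => simp [pvAInner]
    | cons j l ih =>
      simp only [pvAInner]
      split_ifs with hj
      · simp only [List.mem_cons]
        constructor
        · intro _; exact ⟨j, Or.inl rfl, hj⟩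
        · intro _; trivial
      · rw [ih]
        constructor
        · rintro ⟨r, hr, h⟩; exact ⟨r, List.mem_cons_of_mem _ hr, h⟩
        · rintro ⟨r, hr, h⟩
          rcases List.mem_cons.mp hr with rfl | hr'
          · exact absurd h hj
          · exact ⟨r, hr', h⟩
  rw [key]
  simp only [PySem.List.mem_pyRange_one]
  exact ⟨fun ⟨j, ⟨h0, hn⟩, h⟩ => ⟨j, h0, hn, h⟩, fun ⟨j, h0, hn, h⟩ => ⟨j, ⟨h0, hn⟩, h⟩⟩

theorem pvCell_eq_pvGet2 : pvCell = pvGet2 := rfl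

-- the two scans agree on any list of elements lying in [0, n)
theorem pv_scan_eq (conj : List (List Int)) (n e : Int) (l : List Int)
    (hl : ∀ m ∈ l, 0 ≤ m ∧ m < n) :
    pvAOuter conj n e l = pvBFind (pvMark conj n e) l := by
  induction l with
  | nil => rfl
  | cons m l ih =>
    have hm := hl m (List.mem_cons_self ..)
    have heq : pvAInner conj e m (PySem.List.pyRange 0 n 1) =
        PySem.Set.contains (pvMark conj n e) m := by
      rw [Bool.eq_iff_iff, pvAInner_iff, PySem.Set.contains_iff,
        pv_mem_mark_iff conj n e m hm, pvCell_eq_pvGet2]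
    simp only [pvAOuter, pvBFind, heq]
    split_ifs with h
    · exact ih (fun m' hm' => hl m' (List.mem_cons_of_mem _ hm'))
    · rfl

-- ===== VERDICT =====
theorem check_inverse_spec : Claim_equal_check_inverse := by
  intro conj n e _hdom _hpre
  unfold Spec_check_inverse check_inverse check_inverse_alt
  exact pv_scan_eq conj n e _ (fun m hm => by
    have := (PySem.List.mem_pyRange_one).mp hm; omega)
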